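-- pv_equiv track=rewrite | github.com/melzohbi/poem-rhythm-para | uniformer_utils/arpa_cv.py | convert_cv_pattern
-- ===== SOURCE A (Python) =====
-- def convert_cv_pattern(s):
--     output = []
--     i = 0
--     while i < len(s):
--         if i == 0 and s[i] == 'V':
--             output.append('1')
--         elif i < len(s) - 1 and s[i] == 'C' and s[i+1] == 'V':
--             output.append('1')
--             i += 1  # Skip the next character
--         else:
--             output.append('0')
--         i += 1
--     return ''.join(output)
-- ===== SOURCE B (Python) =====
-- def convert_cv_pattern(s):
--     # Pass 1: greedy left-to-right tokenization into 'CV' units and single chars.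
--     tokens = []
--     rest = s
--     while rest:
--         if rest.startswith('CV'):
--             tokens.append('CV')
--             rest = rest[2:]
--         else:
--             tokens.append(rest[0])
--             rest = rest[1:]
--     # Pass 2: map tokens to bits; a leading lone 'V' also counts as '1'.
--     bits = ['1' if t == 'CV' else '0' for t in tokens]
--     if tokens and tokens[0] == 'V':
--         bits[0] = '1'
--     return ''.join(bits)
-- ===== Notes on version B (the rewrite author's own statement) =====
-- stated objective: alternative
-- what changed: Replaces the index-with-manual-skip while loop by a tokenize-then-map decomposition: greedily split the string into 'CV' units and single characters, map each token to a bit, then patch the first bit for a leading lone 'V'.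
import Mathlib
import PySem

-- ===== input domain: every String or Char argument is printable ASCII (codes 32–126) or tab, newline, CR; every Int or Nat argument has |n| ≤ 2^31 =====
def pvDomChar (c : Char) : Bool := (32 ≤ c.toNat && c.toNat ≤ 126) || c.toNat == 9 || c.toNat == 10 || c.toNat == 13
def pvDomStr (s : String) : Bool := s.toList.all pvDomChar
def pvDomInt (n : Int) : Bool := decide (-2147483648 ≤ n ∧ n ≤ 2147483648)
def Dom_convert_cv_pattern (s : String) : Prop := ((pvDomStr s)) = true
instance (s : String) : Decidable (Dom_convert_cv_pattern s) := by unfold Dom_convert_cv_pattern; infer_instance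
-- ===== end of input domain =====

-- B replaces A's index-with-manual-skip while loop by a greedy tokenize-then-map decomposition (same O(n) cost, alternative structure).


-- ===== PORT A =====
-- while loop over index i transcribed as recursion on i; in-range indexing via getD
def pvGoA (cs : List Char) (i : Nat) : List String :=
  if h : i < cs.length then
    if i == 0 && cs.getD i ' ' == 'V' then
      "1" :: pvGoA cs (i + 1)
    else if decide (i < cs.length - 1) && cs.getD i ' ' == 'C' && cs.getD (i + 1) ' ' == 'V' then
      "1" :: pvGoA cs (i + 2)  -- skip the next character
    else
      "0" :: pvGoA cs (i + 1)
  else []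
termination_by cs.length - i
decreasing_by all_goals omega

def convert_cv_pattern (s : String) : String := String.join (pvGoA s.toList 0)

-- ===== PORT B =====
-- greedy tokenizer: 'CV' units or single characters (startswith/slicing turned into pattern match)
def pvTokB : List Char → List (List Char)
  | 'C' :: 'V' :: rest => ['C', 'V'] :: pvTokB rest
  | c :: rest => [c] :: pvTokB rest
  | [] => []

def pvEmitB (t : List Char) : String := if t = ['C', 'V'] then "1" else "0"

def convert_cv_pattern_alt (s : String) : String :=
  let tokens := pvTokB s.toList
  let bits := tokens.map pvEmitB
  let bits :=
    match tokens with
    | t0 :: _ => if t0 = ['V'] then bits.set 0 "1" else bits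
    | [] => bits
  String.join bits


-- ===== PRECONDITION & SPEC =====
def Spec_convert_cv_pattern (s : String) (out : String) : Prop := out = convert_cv_pattern_alt s
instance (s : String) (out : String) : Decidable (Spec_convert_cv_pattern s out) := by unfold Spec_convert_cv_pattern; infer_instance

-- ===== CLAIM (what is proved, stated in full; the proofs are below) =====
def Claim_equal_convert_cv_pattern : Prop := ∀ (s : String), Dom_convert_cv_pattern s → Spec_convert_cv_pattern s (convert_cv_pattern s)

-- ===== LEMMAS AND PROOFS =====

-- tokenizer unfolding when the head cannot start a 'CV' unit
lemma pvTokB_cons_single (c : Char) (rest : List Char)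
    (h : ¬(c = 'C' ∧ rest.headD ' ' = 'V' ∧ rest ≠ [])) :
    pvTokB (c :: rest) = [c] :: pvTokB rest := by
  rcases rest with _ | ⟨d, r⟩
  · rw [pvTokB.eq_def]; split <;> simp_all
  · rw [pvTokB.eq_def]; split <;> simp_all

lemma pvTokB_cons_CV (r : List Char) :
    pvTokB ('C' :: 'V' :: r) = ['C', 'V'] :: pvTokB r := rfl

-- A's loop from any position i ≥ 1 equals B's token-map on the remaining suffix
lemma pvGoA_tail : ∀ (n : Nat) (cs : List Char) (i : Nat), cs.length ≤ i + n → 1 ≤ i →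
    pvGoA cs i = (pvTokB (cs.drop i)).map pvEmitB := by
  intro n
  induction n with
  | zero =>
    intro cs i hle _
    rw [pvGoA, dif_neg (by omega), List.drop_eq_nil_of_le (by omega)]
    rfl
  | succ n ih =>
    intro cs i hle hi
    by_cases h : i < cs.length
    · have hdrop : cs.drop i = cs[i] :: cs.drop (i + 1) := List.drop_eq_getElem_cons h
      rw [pvGoA, dif_pos h]
      have h0 : (i == 0) = false := by simp; omega
      by_cases hcv : i < cs.length - 1 ∧ cs.getD i ' ' = 'C' ∧ cs.getD (i + 1) ' ' = 'V'
      · obtain ⟨h1, hc, hv⟩ := hcv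
        have h1' : i + 1 < cs.length := by omega
        have hdrop1 : cs.drop (i + 1) = cs[i + 1] :: cs.drop (i + 2) :=
          List.drop_eq_getElem_cons h1'
        have hc' : cs[i] = 'C' := by rw [← List.getD_eq_getElem cs ' ' h]; exact hc
        have hv' : cs[i + 1] = 'V' := by rw [← List.getD_eq_getElem cs ' ' h1']; exact hv
        rw [if_neg (by simp [h0]), if_pos (by rw [hc, hv]; simp [h1]),
          hdrop, hdrop1, hc', hv', pvTokB_cons_CV,
          ih cs (i + 2) (by omega) (by omega)]
        rfl
      · have hns : ¬(cs[i] = 'C' ∧ (cs.drop (i + 1)).headD ' ' = 'V' ∧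
            cs.drop (i + 1) ≠ []) := by
          rintro ⟨hc, hv, hne⟩
          have h1 : i + 1 < cs.length := by
            by_contra hge
            exact hne (List.drop_eq_nil_of_le (by omega))
          refine hcv ⟨by omega, ?_, ?_⟩
          · rw [List.getD_eq_getElem cs ' ' h, hc]
          · rw [List.getD_eq_getElem cs ' ' h1]
            rw [List.drop_eq_getElem_cons h1] at hv
            exact hv
        rw [if_neg (by simp [h0]), if_neg (by simpa using hcv),
          hdrop, pvTokB_cons_single _ _ hns, ih cs (i + 1) (by omega) (by omega)]
        simp [pvEmitB]
    · rw [pvGoA, dif_neg h, List.drop_eq_nil_of_le (by omega)]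
      rfl

-- ===== VERDICT (by name: the statement is the Claim_ definition above) =====
theorem convert_cv_pattern_spec : Claim_equal_convert_cv_pattern := by
  intro s _
  unfold Spec_convert_cv_pattern convert_cv_pattern convert_cv_pattern_alt
  rcases s.toList with _ | ⟨c, rest⟩
  · rw [pvGoA]
    simp [pvTokB]
  · by_cases hV : c = 'V'
    · subst hV
      rw [pvGoA, dif_pos (by simp), if_pos (by simp [List.getD]),
        pvGoA_tail rest.length ('V' :: rest) 1 (by simp) (le_refl 1),
        pvTokB_cons_single 'V' rest (by simp)]
      simp [pvEmitB]
    · by_cases hCV : c = 'C' ∧ rest.headD ' ' = 'V' ∧ rest ≠ []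
      · obtain ⟨hc, hv, hne⟩ := hCV
        subst hc
        rcases rest with _ | ⟨d, r⟩
        · exact absurd rfl hne
        · have hd : d = 'V' := hv
          subst hd
          rw [pvGoA, dif_pos (by simp), if_neg (by simp [List.getD]),
            if_pos (by simp [List.getD]),
            pvGoA_tail r.length ('C' :: 'V' :: r) 2 (by simp; omega) (by omega),
            show ('C' :: 'V' :: r).drop 2 = r from rfl, pvTokB_cons_CV]
          simp [pvEmitB]
      · rw [pvGoA, dif_pos (by simp), if_neg (by simp [List.getD, hV]),
          if_neg (by
            rcases rest with _ | ⟨d, r⟩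
            · simp
            · simp only [Bool.and_eq_true, decide_eq_true_eq, beq_iff_eq, not_and,
                List.getD]
              rintro ⟨_, hc⟩ hd
              exact hCV ⟨by simpa using hc, by simpa using hd, by simp⟩),
          pvGoA_tail rest.length (c :: rest) 1 (by simp) (le_refl 1),
          pvTokB_cons_single c rest hCV]
        simp [pvEmitB, hV]
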